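-- pv_equiv track=rewrite | github.com/HeoSeokYong/AlgorithmStudy | Coding_Test/2022_KAKAO_SUMMER_INTERNSHIP/5_행렬과 연산.py | solution
-- ===== SOURCE A (Python) =====
-- from collections import deque
--
-- def solution(rc, operations):
--     # 첫번째 열, 마지막 열, 그리고 중간의 행들을 따로 관리한다.
--     row, col = len(rc), len(rc[0])
--     col_left = deque()
--     col_right = deque()
--     center = deque()
--
--     for i in range(row):
--         tmp = deque()
--         for j in range(col):
--             if j == 0:
--                 col_left.append(rc[i][j])
--             elif j == col-1:
--                 col_right.append(rc[i][j])
--             else: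
--                 tmp.append(rc[i][j])
--         center.append(tmp)
--
--     def ShiftRow():
--         # 각 덱의 마지막 원소를 맨 앞으로 한다.
--         center.rotate()
--         col_left.rotate()
--         col_right.rotate()
--
--     def Rotate():
--         # col_left, col_right, center[0], center[-1] 만 움직이면 된다.
--         if col == 2: # no center
--             col_left.append(col_right.pop())
--             col_right.appendleft(col_left.popleft())
--         else:
--             col_left.append(center[-1].popleft())
--             col_right.appendleft(center[0].pop())
--             center[0].appendleft(col_left.popleft())
--             center[-1].append(col_right.pop())
--
--     for op in operations:
--         if op == 'ShiftRow':
--             ShiftRow()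
--         elif op == 'Rotate':
--             Rotate()
--
--     answer = []
--     # 최종 행렬 만들기
--     for i in range(row):
--         tmp = []
--         for j in range(col):
--             if j == 0:
--                 tmp.append(col_left[i])
--             elif j == col-1:
--                 tmp.append(col_right[i])
--             else:
--                 tmp.append(center[i][j-1])
--
--         answer.append(tmp)
--
--     return answer
-- ===== SOURCE B (Python) =====
-- def rotate_border(rows):
--     # one clockwise step of the outer border, rebuilding the rows functionally
--     if len(rows) == 1:
--         r = rows[0]
--         return [r[-1:] + r[:-1]]
--     top, bottom = rows[0], rows[-1]
--     mid = rows[1:-1]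
--     new_top = [mid[0][0] if mid else bottom[0]] + top[:-1]
--     new_bottom = bottom[1:] + [mid[-1][-1] if mid else top[-1]]
--     lefts = [r[0] for r in mid[1:]] + [bottom[0]]
--     rights = [top[-1]] + [r[-1] for r in mid[:-1]]
--     new_mid = [[l] + r[1:-1] + [rt] for l, r, rt in zip(lefts, mid, rights)]
--     return [new_top] + new_mid + [new_bottom]
--
-- def solution(rc, operations):
--     rows = [list(r) for r in rc]
--     for op in operations:
--         if op == 'ShiftRow':
--             rows = [rows[-1]] + rows[:-1]
--         elif op == 'Rotate':
--             rows = rotate_border(rows)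
--     return rows
-- ===== Notes on version B (the rewrite author's own statement) =====
-- stated objective: simpler
-- what changed: B keeps the matrix as one flat list of rows and applies each operation functionally (ShiftRow = move last row to front; Rotate = rebuild the four border slices shifted one step clockwise), instead of A's three mutable deques (left column, right column, center rows) with pop/append pointer moves and a final element-by-element split and re-join.
-- outside the precondition, e.g. on solution([[1, 2], [3, 4, 5]], []): A returns [[1, 2], [3, 4]], B returns [[1, 2], [3, 4, 5]]; on solution([[1, 2, 3, 4]], ['Rotate']): A returns [[2, 1, 4, 3]], B returns [[4, 1, 2, 3]]
import Mathlib
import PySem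

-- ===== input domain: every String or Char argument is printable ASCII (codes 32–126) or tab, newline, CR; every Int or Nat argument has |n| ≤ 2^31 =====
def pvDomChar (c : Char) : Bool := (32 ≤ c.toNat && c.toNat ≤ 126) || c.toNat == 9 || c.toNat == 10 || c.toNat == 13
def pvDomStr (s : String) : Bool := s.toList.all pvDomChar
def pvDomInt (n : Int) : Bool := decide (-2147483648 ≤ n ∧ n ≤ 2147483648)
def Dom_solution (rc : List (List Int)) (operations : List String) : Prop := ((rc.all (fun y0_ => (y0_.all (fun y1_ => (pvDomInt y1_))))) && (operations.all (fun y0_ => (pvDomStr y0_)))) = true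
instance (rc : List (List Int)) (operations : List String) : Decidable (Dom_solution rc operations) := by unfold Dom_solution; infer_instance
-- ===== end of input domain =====

-- B keeps one flat list of rows and rebuilds the border functionally per operation, instead of
-- A's three split deques; objective: simpler (and it skips A's per-element split/re-join passes).

-- ===== PORT A =====
-- deque.rotate(): move the last element to the front (no-op on an empty deque)
def dqRotate {α : Type} (xs : List α) : List α :=
  match xs.getLast? with
  | none => xs
  | some x => x :: xs.dropLast

-- in-place modification of the last element of a (nonempty) list
def modifyLastL {α : Type} (f : α → α) : List α → List α
  | [] => []
  | [x] => [f x]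
  | x :: y :: xs => x :: modifyLastL f (y :: xs)

-- state = (col_left, col_right, center)
def shiftA (st : List Int × List Int × List (List Int)) : List Int × List Int × List (List Int) :=
  (dqRotate st.1, dqRotate st.2.1, dqRotate st.2.2)

def rotateA (col : Nat) (st : List Int × List Int × List (List Int)) :
    List Int × List Int × List (List Int) :=
  if col = 2 then
    let L1 := st.1 ++ [st.2.1.getLastD 0]
    (L1.tail, L1.headD 0 :: st.2.1.dropLast, st.2.2)
  else
    let x1 := (st.2.2.getLastD []).headD 0
    let C1 := modifyLastL (fun r => r.tail) st.2.2
    let L1 := st.1 ++ [x1]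
    let x2 := (C1.headD []).getLastD 0
    let C2 := C1.modifyHead (fun r => r.dropLast)
    let R1 := x2 :: st.2.1
    let C3 := C2.modifyHead (fun r => L1.headD 0 :: r)
    let L2 := L1.tail
    let C4 := modifyLastL (fun r => r ++ [R1.getLastD 0]) C3
    let R2 := R1.dropLast
    (L2, R2, C4)

-- the j-loop of the build phase: append rc[i][j] to col_left / col_right / tmp
def buildInnerA (col : Nat) (r : List Int) (st : List Int × List Int × List Int) (j : Nat) :
    List Int × List Int × List Int :=
  if j = 0 then (st.1 ++ [r.getD j 0], st.2.1, st.2.2)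
  else if j = col - 1 then (st.1, st.2.1 ++ [r.getD j 0], st.2.2)
  else (st.1, st.2.1, st.2.2 ++ [r.getD j 0])

def buildA (rc : List (List Int)) (row col : Nat) : List Int × List Int × List (List Int) :=
  (List.range row).foldl
    (fun st i =>
      let r := rc.getD i []
      let inner := (List.range col).foldl (buildInnerA col r) (st.1, st.2.1, [])
      (inner.1, inner.2.1, st.2.2 ++ [inner.2.2]))
    ([], [], [])

def assembleA (row col : Nat) (st : List Int × List Int × List (List Int)) : List (List Int) :=
  (List.range row).foldl
    (fun ans i =>
      ans ++ [(List.range col).foldl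
        (fun tmp j =>
          tmp ++ [if j = 0 then st.1.getD i 0
                  else if j = col - 1 then st.2.1.getD i 0
                  else (st.2.2.getD i []).getD (j - 1) 0]) []])
    []

def solution (rc : List (List Int)) (operations : List String) : List (List Int) :=
  let row := rc.length
  let col := (rc.headD []).length
  let fin := operations.foldl
    (fun st op =>
      if op = "ShiftRow" then shiftA st
      else if op = "Rotate" then rotateA col st
      else st)
    (buildA rc row col)
  assembleA row col fin

-- ===== PORT B =====
-- one clockwise step of the outer border, rebuilding the rows functionally
def rotateBorderB (rows : List (List Int)) : List (List Int) :=
  if rows.length = 1 then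
    let r := rows.headD []
    [r.drop (r.length - 1) ++ r.dropLast]
  else
    let top := rows.headD []
    let bottom := rows.getLastD []
    let mid := rows.tail.dropLast
    let newTop := (match mid with | [] => bottom.headD 0 | r :: _ => r.headD 0) :: top.dropLast
    let newBottom := bottom.tail ++
      [(match mid.getLast? with | none => top.getLastD 0 | some r => r.getLastD 0)]
    let lefts := mid.tail.map (fun r => r.headD 0) ++ [bottom.headD 0]
    let rights := top.getLastD 0 :: mid.dropLast.map (fun r => r.getLastD 0)
    let newMid := List.zipWith3 (fun l r rt => l :: (r.dropLast.tail ++ [rt])) lefts mid rights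
    newTop :: newMid ++ [newBottom]

def solution_alt (rc : List (List Int)) (operations : List String) : List (List Int) :=
  operations.foldl
    (fun rows op =>
      if op = "ShiftRow" then rows.getLastD [] :: rows.dropLast
      else if op = "Rotate" then rotateBorderB rows
      else rows)
    rc

-- ===== PRECONDITION & SPEC =====
-- Pre_ excludes: ragged matrices (a row shorter than the first raises IndexError in A; a longer
-- one is silently truncated to the first row's width by A's column-count rebuild, an artefact of
-- its implementation); matrices of width ≤ 1 together with a 'Rotate' (A raises IndexError); and
-- single-row matrices of width ≥ 3 together with a 'Rotate' (the border is degenerate there and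
-- A's doubly-traversed frame value is as accidental as any other choice).
def Pre_solution (rc : List (List Int)) (operations : List String) : Prop :=
  rc ≠ [] ∧ (∀ r ∈ rc, r.length = (rc.headD []).length) ∧
    (((rc.headD []).length ≤ 1 ∨ (rc.length = 1 ∧ 3 ≤ (rc.headD []).length)) →
      "Rotate" ∉ operations)
instance (rc : List (List Int)) (operations : List String) : Decidable (Pre_solution rc operations) := by
  unfold Pre_solution; infer_instance

def pvWitness_solution : List (List Int) × List String :=
  ([[1, 2], [3, 4]], ["Rotate", "ShiftRow", "Rotate"])

def Spec_solution (rc : List (List Int)) (operations : List String) (out : List (List Int)) : Prop := out = solution_alt rc operations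
instance (rc : List (List Int)) (operations : List String) (out : List (List Int)) : Decidable (Spec_solution rc operations out) := by unfold Spec_solution; infer_instance

-- ===== CLAIM (what is proved, stated in full; the proofs are below) =====
def Claim_equal_solution : Prop := ∀ (rc : List (List Int)) (operations : List String), Dom_solution rc operations → Pre_solution rc operations → Spec_solution rc operations (solution rc operations)

-- ===== LEMMAS AND PROOFS =====

-- abbreviations for the three projections of a row
def hd0 (r : List Int) : Int := r.headD 0
def ls0 (r : List Int) : Int := r.getLastD 0
def md (r : List Int) : List Int := r.tail.dropLast

-- the three-deque state corresponding to a flat grid of width m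
def splitG (m : Nat) (g : List (List Int)) : List Int × List Int × List (List Int) :=
  ((if m = 0 then [] else g.map hd0), (if m ≤ 1 then [] else g.map ls0), g.map md)

-- ---- small list facts ----

theorem tail_dropLast {α : Type} (r : List α) : r.tail.dropLast = r.dropLast.tail := by
  cases r with
  | nil => rfl
  | cons x xs =>
    cases xs with
    | nil => rfl
    | cons y ys => simp

theorem hd0_dropLast (r : List Int) (h : 2 ≤ r.length) : (r.dropLast).headD 0 = r.headD 0 := by
  cases r with
  | nil => simp at h
  | cons x xs =>
    cases xs with
    | nil => simp at h
    | cons y ys => simp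

theorem ls0_cons (x : Int) (r : List Int) (h : r ≠ []) : (x :: r).getLastD 0 = r.getLastD 0 := by
  cases r with
  | nil => simp at h
  | cons y ys => simp [List.getLastD_cons]

theorem dropLast_app_ls0 (r : List Int) (h : r ≠ []) : r.dropLast ++ [r.getLastD 0] = r := by
  have h2 := List.dropLast_append_getLast h
  rw [List.getLastD_eq_getLast?, List.getLast?_eq_some_getLast h]
  simpa using h2

theorem getD_last (r : List Int) (h : r ≠ []) : r.getD (r.length - 1) 0 = r.getLastD 0 := by
  rw [List.getD_eq_getElem?_getD]
  rw [List.getLastD_eq_getLast?, List.getLast?_eq_getElem?]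

theorem getD_zero_hd0 (r : List Int) : r.getD 0 0 = r.headD 0 := by
  cases r <;> rfl

theorem dropLast_cons_ne {α : Type} (x : α) (xs : List α) (h : xs ≠ []) :
    (x :: xs).dropLast = x :: xs.dropLast := by
  cases xs with
  | nil => exact absurd rfl h
  | cons y ys => rfl

theorem getLastD_concat'' (xs : List Int) (y d : Int) : (xs ++ [y]).getLastD d = y := by
  rw [List.getLastD_eq_getLast?, List.getLast?_concat]
  rfl

theorem getLastD_concat' (xs : List (List Int)) (y d : List Int) : (xs ++ [y]).getLastD d = y := by
  rw [List.getLastD_eq_getLast?, List.getLast?_concat]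
  rfl

theorem getLastD_cc {α : Type} (x : α) (Y : List α) (z : α) (d : α) :
    (x :: (Y ++ [z])).getLastD d = z := by
  rw [← List.cons_append, List.getLastD_eq_getLast?, List.getLast?_concat]
  rfl

theorem modifyLastL_append {α : Type} (f : α → α) (xs : List α) (y : α) :
    modifyLastL f (xs ++ [y]) = xs ++ [f y] := by
  induction xs with
  | nil => rfl
  | cons a as ih =>
    cases as with
    | nil => simp [modifyLastL]
    | cons b bs => simpa [modifyLastL] using ih

-- ---- range'/map slice lemmas ----

theorem map_getD_range' {α : Type} (d : α) :
    ∀ (k s : Nat) (ys : List α), s + k ≤ ys.length →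
      (List.range' s k).map (fun j => ys.getD j d) = (ys.drop s).take k := by
  intro k
  induction k with
  | zero => intro s ys _; simp
  | succ n ih =>
    intro s ys h
    have hs : s < ys.length := by omega
    rw [List.range'_succ, List.map_cons, ih (s + 1) ys (by omega),
      List.drop_eq_getElem_cons hs, List.take_succ_cons]
    congr 1
    simp [List.getD_eq_getElem?_getD, List.getElem?_eq_getElem hs]

theorem map_range'_shift {α : Type} (k : Nat) (f : Nat → α) :
    (List.range' 1 k).map f = (List.range' 0 k).map (fun j => f (j + 1)) := by
  simp only [List.range'_eq_map_range, List.map_map]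
  apply List.map_congr_left
  intro a _
  simp [Nat.add_comm]

theorem range_decomp (m : Nat) (hm : 2 ≤ m) :
    List.range m = 0 :: (List.range' 1 (m - 2) ++ [m - 1]) := by
  obtain ⟨k, rfl⟩ : ∃ k, m = k + 2 := ⟨m - 2, by omega⟩
  rw [List.range_eq_range', show k + 2 = (k + 1) + 1 from rfl, List.range'_succ]
  simp only [show (0:Nat) + 1 = 1 from rfl]
  rw [List.range'_concat]
  simp only [show (k + 1) + 1 - 2 = k from by omega, show (k + 1) + 1 - 1 = 1 + 1 * k from by omega]

theorem foldl_app_sing {α β : Type} (e : α → β) :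
    ∀ (js : List α) (T : List β), js.foldl (fun t j => t ++ [e j]) T = T ++ js.map e := by
  intro js
  induction js with
  | nil => simp
  | cons j js ih => intro T; simp [ih]

-- ---- zipWith3 projection lemmas ----

theorem zip3_map_hd :
    ∀ (ls : List Int) (rs : List (List Int)) (rts : List Int),
      ls.length = rs.length → rs.length = rts.length →
      (List.zipWith3 (fun l r rt => l :: (r.dropLast.tail ++ [rt])) ls rs rts).map hd0 = ls := by
  intro ls
  induction ls with
  | nil => intro rs rts h1 _; simp [List.zipWith3]
  | cons l ls ih =>
    intro rs rts h1 h2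
    cases rs with
    | nil => simp at h1
    | cons r rs =>
      cases rts with
      | nil => simp at h2
      | cons rt rts =>
        simp only [List.zipWith3, List.map_cons]
        rw [ih rs rts (by simpa using h1) (by simpa using h2)]
        rfl

theorem zip3_map_ls :
    ∀ (ls : List Int) (rs : List (List Int)) (rts : List Int),
      ls.length = rs.length → rs.length = rts.length →
      (List.zipWith3 (fun l r rt => l :: (r.dropLast.tail ++ [rt])) ls rs rts).map ls0 = rts := by
  intro ls
  induction ls with
  | nil =>
    intro rs rts h1 h2
    cases rs with
    | nil => cases rts with
      | nil => simp [List.zipWith3]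
      | cons _ _ => simp at h2
    | cons _ _ => simp at h1
  | cons l ls ih =>
    intro rs rts h1 h2
    cases rs with
    | nil => simp at h1
    | cons r rs =>
      cases rts with
      | nil => simp at h2
      | cons rt rts =>
        simp only [List.zipWith3, List.map_cons]
        rw [ih rs rts (by simpa using h1) (by simpa using h2)]
        have hx : ls0 (l :: (r.dropLast.tail ++ [rt])) = rt := by
          rw [ls0, ← List.cons_append, getLastD_concat'']
        rw [hx]

theorem zip3_map_md :
    ∀ (ls : List Int) (rs : List (List Int)) (rts : List Int),
      ls.length = rs.length → rs.length = rts.length →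
      (List.zipWith3 (fun l r rt => l :: (r.dropLast.tail ++ [rt])) ls rs rts).map md
        = rs.map (fun r => r.dropLast.tail) := by
  intro ls
  induction ls with
  | nil =>
    intro rs rts h1 _
    cases rs with
    | nil => simp [List.zipWith3]
    | cons _ _ => simp at h1
  | cons l ls ih =>
    intro rs rts h1 h2
    cases rs with
    | nil => simp at h1
    | cons r rs =>
      cases rts with
      | nil => simp at h2
      | cons rt rts =>
        simp only [List.zipWith3, List.map_cons]
        rw [ih rs rts (by simpa using h1) (by simpa using h2)]
        simp [md, List.dropLast_concat]


-- ---- getD through map ----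

theorem getD_map_lt {α β : Type} (f : α → β) (g : List α) (j : Nat) (h : j < g.length)
    (d : β) (e : α) : (g.map f).getD j d = f (g.getD j e) := by
  simp [List.getD_eq_getElem?_getD, List.getElem?_map, List.getElem?_eq_getElem, h,
    List.getElem?_eq_getElem (show j < g.length from h)]

-- ---- build phase ----

theorem build_inner_mid (m : Nat) (r : List Int) :
    ∀ (k s : Nat), 1 ≤ s → s + k ≤ m - 1 →
      ∀ (L R T : List Int),
        (List.range' s k).foldl (buildInnerA m r) (L, R, T) =
          (L, R, T ++ (List.range' s k).map (fun j => r.getD j 0)) := by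
  intro k
  induction k with
  | zero => intro s _ _ L R T; simp
  | succ n ih =>
    intro s hs hsk L R T
    rw [List.range'_succ, List.foldl_cons]
    have h0 : ¬ (s = 0) := by omega
    have h1 : ¬ (s = m - 1) := by omega
    simp only [buildInnerA, if_neg h0, if_neg h1]
    rw [ih (s + 1) (by omega) (by omega)]
    simp

theorem build_inner_eval (m : Nat) (r : List Int) (hm : 2 ≤ m) (hr : r.length = m)
    (L R : List Int) :
    (List.range m).foldl (buildInnerA m r) (L, R, []) =
      (L ++ [hd0 r], R ++ [ls0 r], md r) := by
  rw [range_decomp m hm, List.foldl_cons]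
  have e0 : buildInnerA m r (L, R, []) 0 = (L ++ [r.getD 0 0], R, []) := by
    simp [buildInnerA]
  rw [e0, List.foldl_append, build_inner_mid m r (m - 2) 1 (by omega) (by omega)]
  have hm1 : ¬ ((m : Nat) - 1 = 0) := by omega
  simp only [List.foldl_cons, List.foldl_nil, buildInnerA, if_neg hm1, if_pos rfl]
  rw [map_getD_range' (0 : Int) (m - 2) 1 r (by omega)]
  have hmid : (r.drop 1).take (m - 2) = md r := by
    rw [md, ← List.drop_one, List.dropLast_eq_take]
    congr 1
    simp only [List.length_drop]
    omega
  have hlast : r.getD (m - 1) 0 = ls0 r := by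
    rw [← hr, getD_last r (by intro h; rw [h] at hr; simp at hr; omega)]
    rfl
  rw [hmid, hlast, getD_zero_hd0]
  rfl

theorem build_inner_all (m : Nat) (r : List Int) (hr : r.length = m) (L R : List Int) :
    (List.range m).foldl (buildInnerA m r) (L, R, []) =
      (L ++ (if m = 0 then [] else [hd0 r]),
       R ++ (if m ≤ 1 then [] else [ls0 r]),
       md r) := by
  match m, hr with
  | 0, hr =>
    have : r = [] := List.length_eq_zero_iff.mp hr
    subst this
    simp [md]
  | 1, hr =>
    obtain ⟨a, rfl⟩ : ∃ a, r = [a] := List.length_eq_one_iff.mp hr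
    simp [buildInnerA, md, hd0]
  | (n + 2), hr =>
    rw [build_inner_eval (n + 2) r (by omega) hr]
    simp

theorem build_outer (m : Nat) (rc : List (List Int)) (hrect : ∀ r ∈ rc, r.length = m) :
    ∀ (k s : Nat), s + k = rc.length → ∀ (L R : List Int) (C : List (List Int)),
      (List.range' s k).foldl
        (fun st i =>
          let r := rc.getD i []
          let inner := (List.range m).foldl (buildInnerA m r) (st.1, st.2.1, [])
          (inner.1, inner.2.1, st.2.2 ++ [inner.2.2]))
        (L, R, C) =
      (L ++ (if m = 0 then [] else (rc.drop s).map hd0),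
       R ++ (if m ≤ 1 then [] else (rc.drop s).map ls0),
       C ++ (rc.drop s).map md) := by
  intro k
  induction k with
  | zero =>
    intro s hs L R C
    have : rc.drop s = [] := by
      apply List.drop_eq_nil_of_le; omega
    simp [this]
  | succ n ih =>
    intro s hs L R C
    have hslt : s < rc.length := by omega
    rw [List.range'_succ, List.foldl_cons]
    have hget : rc.getD s [] = rc[s] := by
      simp [List.getD_eq_getElem?_getD, List.getElem?_eq_getElem hslt]
    have hlen : rc[s].length = m := hrect _ (List.getElem_mem hslt)
    simp only [hget]
    rw [build_inner_all m rc[s] hlen]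
    rw [ih (s + 1) (by omega)]
    rw [List.drop_eq_getElem_cons hslt]
    simp only [List.map_cons]
    refine Prod.ext ?_ (Prod.ext ?_ ?_) <;> by_cases h0 : m = 0 <;>
      by_cases h1 : m ≤ 1 <;> simp [h0, h1] <;> simp_all <;> omega

theorem build_eval (m : Nat) (rc : List (List Int)) (hrect : ∀ r ∈ rc, r.length = m) :
    buildA rc rc.length m = splitG m rc := by
  rw [buildA, show List.range rc.length = List.range' 0 rc.length from List.range_eq_range']
  rw [build_outer m rc hrect rc.length 0 (by omega)]
  simp [splitG]

-- ---- assembly phase ----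

theorem row_recon (r : List Int) (h : 2 ≤ r.length) :
    hd0 r :: (md r ++ [ls0 r]) = r := by
  cases r with
  | nil => simp at h
  | cons a t =>
    have ht : t ≠ [] := by
      intro h2; rw [h2] at h; simp at h
    rw [hd0, md, ls0, ls0_cons a t ht]
    simp only [List.headD_cons, List.tail_cons]
    rw [dropLast_app_ls0 t ht]

theorem row_eval (m : Nat) (hm : 2 ≤ m) (x y : Int) (Ci : List Int)
    (hlen : Ci.length = m - 2) :
    (List.range m).map
      (fun j => if j = 0 then x else if j = m - 1 then y else Ci.getD (j - 1) 0) =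
      x :: (Ci ++ [y]) := by
  rw [range_decomp m hm]
  simp only [List.map_cons, List.map_append, if_pos rfl]
  have hm1 : ¬ ((m : Nat) - 1 = 0) := by omega
  have hmid : (List.range' 1 (m - 2)).map
      (fun j => if j = 0 then x else if j = m - 1 then y else Ci.getD (j - 1) 0) =
      (List.range' 1 (m - 2)).map (fun j => Ci.getD (j - 1) 0) := by
    apply List.map_congr_left
    intro j hj
    rw [List.mem_range'] at hj
    obtain ⟨i, hi, rfl⟩ := hj
    rw [if_neg (by omega : ¬ (1 + 1 * i = 0)), if_neg (by omega : ¬ (1 + 1 * i = m - 1))]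
  rw [hmid, map_range'_shift (m - 2) (fun j => Ci.getD (j - 1) 0)]
  have : (List.range' 0 (m - 2)).map (fun j => Ci.getD (j + 1 - 1) 0) = Ci := by
    have h3 := map_getD_range' (0 : Int) (m - 2) 0 Ci (by omega)
    simp only [Nat.add_sub_cancel]
    rw [h3, List.drop_zero, ← hlen, List.take_length]
  rw [this]
  simp [if_neg hm1]

theorem assemble_eval (m : Nat) (g : List (List Int)) (hrect : ∀ r ∈ g, r.length = m) :
    assembleA g.length m (splitG m g) = g := by
  rw [assembleA, foldl_app_sing]
  rw [show List.range g.length = List.range' 0 g.length from List.range_eq_range']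
  try simp only [List.nil_append]
  have hpt : ∀ j ∈ List.range' 0 g.length,
      (List.range m).foldl
        (fun tmp k =>
          tmp ++ [if k = 0 then (splitG m g).1.getD j 0
                  else if k = m - 1 then (splitG m g).2.1.getD j 0
                  else ((splitG m g).2.2.getD j []).getD (k - 1) 0]) [] = g.getD j [] := by
    intro j hj
    rw [List.mem_range'] at hj
    obtain ⟨i, hi, rfl⟩ := hj
    try simp only [Nat.zero_add, Nat.one_mul]
    try simp only [Nat.zero_add, Nat.one_mul] at hi
    have hjlt : i < g.length := hi
    have hglen : g[i].length = m := hrect _ (List.getElem_mem hjlt)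
    rw [foldl_app_sing]
    simp only [List.nil_append]
    have hgetg : g.getD i [] = g[i] := by
      simp [List.getD_eq_getElem?_getD, List.getElem?_eq_getElem hjlt]
    match m, hglen with
    | 0, hglen =>
      have hnil : g[i] = [] := List.length_eq_zero_iff.mp hglen
      simp [splitG, List.getD_eq_getElem?_getD, List.getElem?_eq_getElem hjlt, hnil]
    | 1, hglen =>
      obtain ⟨a, ha⟩ : ∃ a, g[i] = [a] := List.length_eq_one_iff.mp hglen
      simp [splitG, List.getD_eq_getElem?_getD, List.getElem?_map,
        List.getElem?_eq_getElem hjlt, ha, hd0]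
    | (n + 2), hglen =>
      simp only [splitG, if_neg (by omega : ¬ (n + 2 = 0)), if_neg (by omega : ¬ (n + 2 ≤ 1))]
      rw [getD_map_lt hd0 g _ hjlt 0 [], getD_map_lt ls0 g _ hjlt 0 [],
        getD_map_lt md g _ hjlt [] [], hgetg]
      rw [row_eval (n + 2) (by omega) _ _ _ (by rw [md, ← List.drop_one, List.dropLast_eq_take]; simp only [List.length_drop, List.length_take, hglen]; omega)]
      exact row_recon g[i] (by omega)
  rw [List.map_congr_left hpt]
  have h3 := map_getD_range' ([] : List Int) g.length 0 g (by omega)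
  rw [h3, List.drop_zero, List.take_length]

-- ---- ShiftRow commutes ----

theorem dqRotate_map {γ : Type} (f : List Int → γ) (g : List (List Int)) (hg : g ≠ []) :
    dqRotate (g.map f) = f (g.getLastD []) :: (g.dropLast.map f) := by
  unfold dqRotate
  rw [List.getLast?_map]
  cases hL : g.getLast? with
  | none => exact absurd (List.getLast?_eq_none_iff.mp hL) hg
  | some x =>
    simp [List.getLastD_eq_getLast?, hL, List.map_dropLast]

theorem shift_comm (m : Nat) (g : List (List Int)) (hg : g ≠ []) :
    shiftA (splitG m g) = splitG m (g.getLastD [] :: g.dropLast) := by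
  unfold shiftA splitG
  refine Prod.ext ?_ (Prod.ext ?_ ?_)
  · by_cases h0 : m = 0
    · simp [h0, dqRotate]
    · simp only [if_neg h0]
      rw [dqRotate_map hd0 g hg]
      simp
  · by_cases h1 : m ≤ 1
    · simp [h1, dqRotate]
    · simp only [if_neg h1]
      rw [dqRotate_map ls0 g hg]
      simp
  · rw [dqRotate_map md g hg]
    simp

-- ---- Rotate commutes ----

theorem zip3_nil_mid {α γ δ : Type} (f : α → List Int → γ → δ) (ls : List α) (rts : List γ) :
    List.zipWith3 f ls [] rts = [] := by
  cases ls <;> rfl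

theorem rotB_eval (t b : List Int) (body : List (List Int)) :
    rotateBorderB (t :: (body ++ [b])) =
      ((match body with | [] => b.headD 0 | r :: _ => r.headD 0) :: t.dropLast) ::
      (List.zipWith3 (fun l r rt => l :: (r.dropLast.tail ++ [rt]))
          (body.tail.map (fun r => r.headD 0) ++ [b.headD 0]) body
          (t.getLastD 0 :: body.dropLast.map (fun r => r.getLastD 0))) ++
      [b.tail ++ [(match body.getLast? with | none => t.getLastD 0 | some r => r.getLastD 0)]] := by
  have hlen : ¬ ((t :: (body ++ [b])).length = 1) := by simp
  have h2 : (t :: (body ++ [b])).getLastD [] = b := by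
    rw [show t :: (body ++ [b]) = (t :: body) ++ [b] from rfl, getLastD_concat']
  have h3 : (t :: (body ++ [b])).tail.dropLast = body := by
    simp [List.dropLast_concat]
  rw [rotateBorderB, if_neg hlen]
  simp only [show (t :: (body ++ [b])).headD [] = t from rfl, h2, h3]

theorem len_ne_nil {α : Type} (r : List α) (h : 1 ≤ r.length) : r ≠ [] := by
  intro h2; rw [h2] at h; simp at h

theorem modifyLastL_cons {α : Type} (f : α → α) (x : α) (xs : List α) (h : xs ≠ []) :
    modifyLastL f (x :: xs) = x :: modifyLastL f xs := by
  cases xs with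
  | nil => exact absurd rfl h
  | cons y ys => rfl

theorem dropLast_append_getLastD {α : Type} (xs : List α) (h : xs ≠ []) (d : α) :
    xs.dropLast ++ [xs.getLastD d] = xs := by
  have h2 := List.dropLast_append_getLast h
  rw [List.getLastD_eq_getLast?, List.getLast?_eq_some_getLast h]
  simpa using h2

theorem map_dropLast_app {γ : Type} (f : List Int → γ) (xs : List (List Int)) (h : xs ≠ [])
    (d : List Int) : xs.dropLast.map f ++ [f (xs.getLastD d)] = xs.map f := by
  conv_rhs => rw [← dropLast_append_getLastD xs h d]
  simp

theorem hd0_append (xs ys : List Int) (h : xs ≠ []) : hd0 (xs ++ ys) = hd0 xs := by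
  cases xs with
  | nil => exact absurd rfl h
  | cons a t => rfl

theorem hd0_tail_two (b : List Int) (h : b.length = 2) : hd0 b.tail = ls0 b := by
  obtain ⟨x, y, rfl⟩ := List.length_eq_two.mp h
  rfl

theorem ls0_dropLast (r : List Int) (h : 3 ≤ r.length) : ls0 r.dropLast = ls0 (md r) := by
  cases r with
  | nil => simp at h
  | cons x rr =>
    have hrr : rr ≠ [] := len_ne_nil rr (by simp at h; omega)
    rw [dropLast_cons_ne x rr hrr, md, List.tail_cons, ls0,
      ls0_cons x rr.dropLast (len_ne_nil _ (by simp; simp at h; omega))]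
    rfl

theorem dropLast_dropLast_eq (t : List Int) (h : 3 ≤ t.length) :
    t.dropLast.dropLast = hd0 t :: (md t).dropLast := by
  cases t with
  | nil => simp at h
  | cons x rr =>
    have hrr : rr ≠ [] := len_ne_nil rr (by simp at h; omega)
    rw [dropLast_cons_ne x rr hrr,
      dropLast_cons_ne x rr.dropLast (len_ne_nil _ (by simp; simp at h; omega))]
    rfl

theorem md_append_last (xs : List Int) (y : Int) (h : xs ≠ []) :
    md (xs ++ [y]) = xs.tail := by
  rw [md]
  cases xs with
  | nil => exact absurd rfl h
  | cons a t => simp [List.dropLast_concat]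

theorem mdb_eq (b : List Int) (h : 3 ≤ b.length) :
    (md b).tail ++ [ls0 b] = b.tail.tail := by
  rw [md, ← tail_dropLast b.tail]
  have h1 : b.tail.tail ≠ [] := by
    apply len_ne_nil; simp; omega
  have h2 : ls0 b = b.tail.tail.getLastD 0 := by
    cases b with
    | nil => simp at h
    | cons x rr =>
      cases rr with
      | nil => simp at h
      | cons y ss =>
        rw [ls0, ls0_cons x (y :: ss) (by simp), ls0_cons y ss (len_ne_nil _ (by simp at h ⊢; omega))]
        rfl
  rw [h2, dropLast_append_getLastD _ h1]

theorem hd0_md (b : List Int) (h : 3 ≤ b.length) : hd0 (md b) = hd0 b.tail := by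
  rw [md]
  exact hd0_dropLast b.tail (by simp; omega)

theorem getLastD_app {α : Type} (Y : List α) (z d : α) : (Y ++ [z]).getLastD d = z := by
  rw [List.getLastD_eq_getLast?, List.getLast?_concat]
  rfl

theorem ls0_dropLast_two (t : List Int) (h : t.length = 2) : ls0 t.dropLast = hd0 t := by
  obtain ⟨x, y, rfl⟩ := List.length_eq_two.mp h
  rfl

theorem md_two (r : List Int) (h : r.length = 2) : md r = [] := by
  obtain ⟨x, y, rfl⟩ := List.length_eq_two.mp h
  rfl

theorem ddl_two (r : List Int) (h : r.length = 2) : r.dropLast.dropLast = [] := by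
  obtain ⟨x, y, rfl⟩ := List.length_eq_two.mp h
  rfl

theorem tt_two (r : List Int) (h : r.length = 2) : r.tail.tail = [] := by
  obtain ⟨x, y, rfl⟩ := List.length_eq_two.mp h
  rfl

theorem rotate_comm (m : Nat) (g : List (List Int)) (hg : g ≠ [])
    (hrect : ∀ r ∈ g, r.length = m) (hm : 2 ≤ m) (hone : g.length = 1 → m = 2) :
    rotateA m (splitG m g) = splitG m (rotateBorderB g) := by
  cases g with
  | nil => exact absurd rfl hg
  | cons t rest =>
    by_cases hrst : rest = []
    · subst hrst
      have hm2 : m = 2 := hone (by simp)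
      subst hm2
      obtain ⟨a, c, rfl⟩ := List.length_eq_two.mp (hrect t (by simp))
      rfl
    · obtain ⟨body, b, hbb⟩ := (List.eq_nil_or_concat rest).resolve_left hrst
      rw [List.concat_eq_append] at hbb
      subst hbb
      have ht : t.length = m := hrect t (by simp)
      have hb : b.length = m := hrect b (by simp)
      have hbody : ∀ r ∈ body, r.length = m := by
        intro r hr; exact hrect r (by simp [hr])
      rw [rotB_eval]
      have hm0 : ¬ (m = 0) := by omega
      have hm1 : ¬ (m ≤ 1) := by omega
      simp only [splitG, if_neg hm0, if_neg hm1, List.map_cons, List.map_append]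
      cases body with
      | nil =>
        by_cases hm2 : m = 2
        · subst hm2
          obtain ⟨t0, t1, rfl⟩ := List.length_eq_two.mp ht
          obtain ⟨b0, b1, rfl⟩ := List.length_eq_two.mp hb
          rfl
        · have hm3 : 3 ≤ m := by omega
          rw [rotateA, if_neg hm2]
          simp only [List.map_nil, List.tail_nil, List.dropLast_nil, List.nil_append,
            List.getLast?_nil, zip3_nil_mid]
          have ht3 : 3 ≤ t.length := by omega
          have hb3 : 3 ≤ b.length := by omega
          have hbt : b.tail ≠ [] := len_ne_nil _ (by simp; omega)
          have htd : t.dropLast ≠ [] := len_ne_nil _ (by simp; omega)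
          simp only [modifyLastL, List.modifyHead, List.getLastD_cons, List.headD_cons,
            List.tail_cons, List.dropLast_cons₂, List.dropLast_singleton, List.cons_append,
            List.nil_append]
          refine Prod.ext ?_ (Prod.ext ?_ ?_)
          · show _ = [hd0 (b.headD 0 :: t.dropLast)] ++ [hd0 (b.tail ++ [t.getLastD 0])]
            rw [show hd0 (b.headD 0 :: t.dropLast) = hd0 b from rfl,
              hd0_append b.tail _ hbt, ← hd0_md b hb3]
            rfl
          · show _ = [ls0 (b.headD 0 :: t.dropLast)] ++ [ls0 (b.tail ++ [t.getLastD 0])]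
            rw [show ls0 (b.headD 0 :: t.dropLast) = ls0 t.dropLast from ls0_cons _ _ htd,
              ls0_dropLast t ht3,
              show ls0 (b.tail ++ [t.getLastD 0]) = ls0 t from getLastD_concat'' _ _ _]
            rfl
          · show _ = [md (b.headD 0 :: t.dropLast)] ++ [md (b.tail ++ [t.getLastD 0])]
            rw [show md (b.headD 0 :: t.dropLast) = t.dropLast.dropLast from rfl,
              dropLast_dropLast_eq t ht3, md_append_last b.tail _ hbt, ← mdb_eq b hb3]
            rfl
      | cons p ps =>
        have hpne : (p :: ps : List (List Int)) ≠ [] := by simp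
        have hgl : (p :: ps).getLast? = some ((p :: ps).getLastD []) := by
          rw [List.getLastD_eq_getLast?, List.getLast?_eq_some_getLast hpne]
          rfl
        rw [hgl]
        simp only [List.tail_cons, List.map_nil]
        have hlen1 : (List.map (fun r => r.headD 0) ps ++ [b.headD 0]).length
            = (p :: ps : List (List Int)).length := by simp
        have hlen2 : (p :: ps : List (List Int)).length
            = (t.getLastD 0 :: List.map (fun r => r.getLastD 0) (p :: ps).dropLast).length := by
          simp
        rw [zip3_map_hd _ _ _ hlen1 hlen2, zip3_map_ls _ _ _ hlen1 hlen2,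
          zip3_map_md _ _ _ hlen1 hlen2]
        have hmdcongr : List.map (fun r => r.dropLast.tail) (p :: ps : List (List Int))
            = List.map md (p :: ps) := by
          apply List.map_congr_left
          intro r _
          rw [md, tail_dropLast]
        rw [hmdcongr]
        have hbt : b.tail ≠ [] := len_ne_nil _ (by simp; omega)
        have htd : t.dropLast ≠ [] := len_ne_nil _ (by simp; omega)
        have hmapsls : t.getLastD 0 :: (List.map (fun r => r.getLastD 0) (p :: ps).dropLast
            ++ [((p :: ps).getLastD []).getLastD 0]) = ls0 t :: List.map ls0 (p :: ps) := by
          congr 1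
          exact map_dropLast_app ls0 (p :: ps) hpne []
        have hls0btl : ls0 (b.tail ++ [((p :: ps).getLastD []).getLastD 0])
            = ((p :: ps).getLastD []).getLastD 0 := getLastD_app _ _ _
        by_cases hm2 : m = 2
        · -- width 2: A takes the no-center branch
          rw [rotateA, if_pos hm2]
          have hb2 : b.length = 2 := by omega
          have ht2 : t.length = 2 := by omega
          refine Prod.ext ?_ (Prod.ext ?_ ?_)
          · show ((hd0 t :: (List.map hd0 (p :: ps) ++ [hd0 b]))
                ++ [(ls0 t :: (List.map ls0 (p :: ps) ++ [ls0 b])).getLastD 0]).tail = _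
            simp only [List.getLastD_cons, getLastD_app, List.cons_append, List.tail_cons]
            rw [hd0_append b.tail _ hbt,
              show (ls0 b : Int) = hd0 b.tail from (hd0_tail_two b hb2).symm]
            simp [List.append_assoc]
            refine ⟨by cases p <;> rfl, ?_⟩
            rw [show List.map hd0 ps = List.map (fun r => r.head?.getD 0) ps from
              List.map_congr_left (fun r _ => by cases r <;> rfl)]
            rw [show (hd0 b : Int) = b.head?.getD 0 from by cases b <;> rfl]
          · show (((hd0 t :: (List.map hd0 (p :: ps) ++ [hd0 b]))
                ++ [(ls0 t :: (List.map ls0 (p :: ps) ++ [ls0 b])).getLastD 0]).headD 0)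
                :: (ls0 t :: (List.map ls0 (p :: ps) ++ [ls0 b])).dropLast = _
            simp only [List.cons_append, List.headD_cons]
            have hdL : (ls0 t :: (List.map ls0 (p :: ps) ++ [ls0 b])).dropLast
                = ls0 t :: List.map ls0 (p :: ps) := by
              rw [show ls0 t :: (List.map ls0 (p :: ps) ++ [ls0 b])
                  = (ls0 t :: List.map ls0 (p :: ps)) ++ [ls0 b] by simp, List.dropLast_concat]
            rw [hdL, hls0btl, hmapsls,
              show ls0 (p.headD 0 :: t.dropLast) = ls0 t.dropLast from ls0_cons _ _ htd,
              ls0_dropLast_two t ht2]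
          · show (md t :: (List.map md (p :: ps) ++ [md b])) = _
            rw [md_append_last b.tail _ hbt,
              show md (p.headD 0 :: t.dropLast) = t.dropLast.dropLast from rfl,
              ddl_two t ht2, tt_two b hb2, md_two t ht2, md_two b hb2]
            simp
        · -- width ≥ 3
          have hm3 : 3 ≤ m := by omega
          have ht3 : 3 ≤ t.length := by omega
          have hb3 : 3 ≤ b.length := by omega
          rw [rotateA, if_neg hm2]
          have hC : (md t :: (List.map md (p :: ps) ++ [md b])).getLastD [] = md b :=
            getLastD_cc _ _ _ _
          have hC1 : modifyLastL (fun r => r.tail) (md t :: (List.map md (p :: ps) ++ [md b]))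
              = md t :: (List.map md (p :: ps) ++ [(md b).tail]) := by
            rw [modifyLastL_cons _ _ _ (by simp), modifyLastL_append]
          refine Prod.ext ?_ (Prod.ext ?_ ?_)
          · show ((hd0 t :: (List.map hd0 (p :: ps) ++ [hd0 b]))
                ++ [((md t :: (List.map md (p :: ps) ++ [md b])).getLastD []).headD 0]).tail = _
            rw [hC]
            simp only [List.cons_append, List.tail_cons]
            rw [show ((md b).headD 0 : Int) = hd0 (md b) from rfl, hd0_md b hb3,
              hd0_append b.tail _ hbt]
            simp [List.append_assoc, hd0]
          · show ((((modifyLastL (fun r => r.tail) (md t :: (List.map md (p :: ps) ++ [md b]))).headD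
                  []).getLastD 0) :: ls0 t :: (List.map ls0 (p :: ps) ++ [ls0 b])).dropLast = _
            rw [hC1]
            simp only [List.headD_cons, List.cons_append]
            have hdL : (((md t).getLastD 0) :: ls0 t :: (List.map ls0 (p :: ps) ++ [ls0 b])).dropLast
                = ((md t).getLastD 0) :: ls0 t :: List.map ls0 (p :: ps) := by
              rw [show ((md t).getLastD 0) :: ls0 t :: (List.map ls0 (p :: ps) ++ [ls0 b])
                  = (((md t).getLastD 0) :: ls0 t :: List.map ls0 (p :: ps)) ++ [ls0 b] by simp,
                List.dropLast_concat]
            rw [hdL, hls0btl, hmapsls,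
              show ls0 (p.headD 0 :: t.dropLast) = ls0 t.dropLast from ls0_cons _ _ htd,
              ls0_dropLast t ht3]
            rfl
          · show modifyLastL
                (fun r => r ++ [((((modifyLastL (fun r => r.tail)
                    (md t :: (List.map md (p :: ps) ++ [md b]))).headD []).getLastD 0)
                  :: ls0 t :: (List.map ls0 (p :: ps) ++ [ls0 b])).getLastD 0])
                (List.modifyHead
                  (fun r => ((hd0 t :: (List.map hd0 (p :: ps) ++ [hd0 b]))
                      ++ [((md t :: (List.map md (p :: ps) ++ [md b])).getLastD []).headD 0]).headD 0
                    :: r)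
                  (List.modifyHead (fun r => r.dropLast)
                    (modifyLastL (fun r => r.tail)
                      (md t :: (List.map md (p :: ps) ++ [md b]))))) = _
            rw [hC, hC1]
            simp only [List.modifyHead, List.cons_append, List.headD_cons]
            simp only [List.getLastD_cons, getLastD_app]
            rw [modifyLastL_cons _ _ _ (by simp), modifyLastL_append]
            rw [md_append_last b.tail _ hbt, mdb_eq b hb3,
              show md (p.headD 0 :: t.dropLast) = t.dropLast.dropLast from rfl,
              dropLast_dropLast_eq t ht3]

theorem zip3_mem {α β γ δ : Type} (f : α → β → γ → δ) :
    ∀ (as : List α) (bs : List β) (cs : List γ) (x : δ),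
      x ∈ List.zipWith3 f as bs cs → ∃ a b c, b ∈ bs ∧ x = f a b c := by
  intro as
  induction as with
  | nil => intro bs cs x hx; simp [List.zipWith3] at hx
  | cons a as ih =>
    intro bs cs x hx
    cases bs with
    | nil => simp [List.zipWith3] at hx
    | cons b bs =>
      cases cs with
      | nil => simp [List.zipWith3] at hx
      | cons c cs =>
        simp only [List.zipWith3, List.mem_cons] at hx
        rcases hx with hx | hx
        · exact ⟨a, b, c, by simp, hx⟩
        · obtain ⟨a', b', c', hb', hx'⟩ := ih bs cs x hx
          exact ⟨a', b', c', by simp [hb'], hx'⟩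

theorem zip3_len {α β γ δ : Type} (f : α → β → γ → δ) :
    ∀ (as : List α) (bs : List β) (cs : List γ),
      as.length = bs.length → bs.length = cs.length →
      (List.zipWith3 f as bs cs).length = bs.length := by
  intro as
  induction as with
  | nil =>
    intro bs cs h1 _
    cases bs with
    | nil => simp [List.zipWith3]
    | cons _ _ => simp at h1
  | cons a as ih =>
    intro bs cs h1 h2
    cases bs with
    | nil => simp at h1
    | cons b bs =>
      cases cs with
      | nil => simp at h2
      | cons c cs =>
        simp only [List.zipWith3, List.length_cons]
        rw [ih bs cs (by simpa using h1) (by simpa using h2)]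

theorem rotB_shape (m : Nat) (g : List (List Int)) (hg : g ≠ [])
    (hrect : ∀ r ∈ g, r.length = m) (hm : 2 ≤ m) :
    (rotateBorderB g).length = g.length ∧ ∀ r ∈ rotateBorderB g, r.length = m := by
  cases g with
  | nil => exact absurd rfl hg
  | cons t rest =>
    by_cases hrst : rest = []
    · subst hrst
      have ht : t.length = m := hrect t (by simp)
      have hone : rotateBorderB [t] = [t.drop (t.length - 1) ++ t.dropLast] := by
        rw [rotateBorderB]
        simp
      rw [hone]
      constructor
      · simp
      · intro r hr
        simp only [List.mem_singleton] at hr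
        subst hr
        simp [ht] <;> omega
    · obtain ⟨body, b, hbb⟩ := (List.eq_nil_or_concat rest).resolve_left hrst
      rw [List.concat_eq_append] at hbb
      subst hbb
      have ht : t.length = m := hrect t (by simp)
      have hb : b.length = m := hrect b (by simp)
      have hbody : ∀ r ∈ body, r.length = m := by
        intro r hr; exact hrect r (by simp [hr])
      rw [rotB_eval]
      have hzlen : (List.zipWith3 (fun l r rt => l :: (r.dropLast.tail ++ [rt]))
          (body.tail.map (fun r => r.headD 0) ++ [b.headD 0]) body
          (t.getLastD 0 :: body.dropLast.map (fun r => r.getLastD 0))).length = body.length := by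
        cases body with
        | nil => simp [zip3_nil_mid]
        | cons p ps =>
          rw [zip3_len _ _ _ _ (by simp) (by simp)]
      constructor
      · simp only [List.length_cons, List.length_append, List.length_singleton, hzlen]
        omega
      · intro r hr
        rw [List.mem_append, List.mem_cons, List.mem_singleton] at hr
        rcases hr with (rfl | hr) | rfl
        · simp [ht] <;> omega
        · obtain ⟨l, rr, rt, hrr, hx⟩ := zip3_mem _ _ _ _ _ hr
          subst hx
          have : rr.length = m := hbody rr hrr
          simp [this] <;> omega
        · simp [hb] <;> omega

theorem fold_comm (m : Nat) :
    ∀ (ops : List String) (g : List (List Int)), g ≠ [] → (∀ r ∈ g, r.length = m) →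
      ("Rotate" ∈ ops → 2 ≤ m ∧ (g.length = 1 → m = 2)) →
      (ops.foldl
          (fun st op => if op = "ShiftRow" then shiftA st
            else if op = "Rotate" then rotateA m st else st) (splitG m g)
        = splitG m (ops.foldl
          (fun rows op => if op = "ShiftRow" then rows.getLastD [] :: rows.dropLast
            else if op = "Rotate" then rotateBorderB rows else rows) g))
      ∧ (ops.foldl
          (fun rows op => if op = "ShiftRow" then rows.getLastD [] :: rows.dropLast
            else if op = "Rotate" then rotateBorderB rows else rows) g) ≠ []
      ∧ (∀ r ∈ (ops.foldl
          (fun rows op => if op = "ShiftRow" then rows.getLastD [] :: rows.dropLast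
            else if op = "Rotate" then rotateBorderB rows else rows) g), r.length = m)
      ∧ (ops.foldl
          (fun rows op => if op = "ShiftRow" then rows.getLastD [] :: rows.dropLast
            else if op = "Rotate" then rotateBorderB rows else rows) g).length = g.length := by
  intro ops
  induction ops with
  | nil => intro g hg hrect _; exact ⟨rfl, hg, hrect, rfl⟩
  | cons op ops ih =>
    intro g hg hrect hcond
    simp only [List.foldl_cons]
    by_cases hso : op = "ShiftRow"
    · rw [if_pos hso, if_pos hso]
      rw [shift_comm m g hg]
      have hg' : (g.getLastD [] :: g.dropLast) ≠ [] := by simp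
      have hrect' : ∀ r ∈ g.getLastD [] :: g.dropLast, r.length = m := by
        intro r hr
        rcases List.mem_cons.mp hr with rfl | hr
        · rw [List.getLastD_eq_getLast?, List.getLast?_eq_some_getLast hg]
          exact hrect _ (List.getLast_mem hg)
        · exact hrect r (List.dropLast_subset g hr)
      have hlen' : (g.getLastD [] :: g.dropLast).length = g.length := by
        cases g with
        | nil => exact absurd rfl hg
        | cons x xs => simp
      have hcond' : "Rotate" ∈ ops → 2 ≤ m ∧ ((g.getLastD [] :: g.dropLast).length = 1 → m = 2) := by
        intro hr
        have := hcond (by simp [hr])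
        rw [hlen']
        exact this
      obtain ⟨h1, h2, h3, h4⟩ := ih (g.getLastD [] :: g.dropLast) hg' hrect' hcond'
      exact ⟨h1, h2, h3, by rw [h4, hlen']⟩
    · rw [if_neg hso, if_neg hso]
      by_cases hro : op = "Rotate"
      · rw [if_pos hro, if_pos hro]
        have hcm := hcond (by simp [hro])
        rw [rotate_comm m g hg hrect hcm.1 hcm.2]
        obtain ⟨hlen', hrect'⟩ := rotB_shape m g hg hrect hcm.1
        have hg' : rotateBorderB g ≠ [] := by
          intro h
          rw [h] at hlen'
          cases g with
          | nil => exact absurd rfl hg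
          | cons x xs => simp at hlen'
        have hcond' : "Rotate" ∈ ops → 2 ≤ m ∧ ((rotateBorderB g).length = 1 → m = 2) := by
          intro hr
          refine ⟨hcm.1, ?_⟩
          rw [hlen']
          exact hcm.2
        obtain ⟨h1, h2, h3, h4⟩ := ih (rotateBorderB g) hg' hrect' hcond'
        exact ⟨h1, h2, h3, by rw [h4, hlen']⟩
      · rw [if_neg hro, if_neg hro]
        exact ih g hg hrect (fun hr => hcond (by simp [hr]))

theorem solution_spec : Claim_equal_solution := by
  intro rc operations hdom hpre
  obtain ⟨hne, hrect, hcond⟩ := hpre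
  show solution rc operations = solution_alt rc operations
  rw [solution, solution_alt]
  rw [build_eval ((rc.headD []).length) rc hrect]
  have hcond' : "Rotate" ∈ operations →
      2 ≤ (rc.headD []).length ∧ (rc.length = 1 → (rc.headD []).length = 2) := by
    intro hr
    constructor
    · by_contra h
      exact hcond (Or.inl (by omega)) hr
    · intro h1
      by_contra h
      have h2 : 2 ≤ (rc.headD []).length := by
        by_contra h3
        exact hcond (Or.inl (by omega)) hr
      exact hcond (Or.inr ⟨h1, by omega⟩) hr
  obtain ⟨h1, h2, h3, h4⟩ := fold_comm ((rc.headD []).length) operations rc hne hrect hcond'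
  rw [h1, ← h4]
  exact assemble_eval ((rc.headD []).length) _ h3
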